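-- pv_equiv track=rewrite | github.com/Protonk/BIDDER | experiments/math/diophantus/predicate_search.py | per_strip_atoms
-- ===== SOURCE A (Python) =====
-- def per_strip_atoms(b, n, d):
--     W = b**(d - 1)
--     n2 = n * n
--     atoms = []
--     for k in range(1, b):
--         lo = k * W
--         hi = (k + 1) * W - 1
--         c_n = hi // n - (lo - 1) // n
--         c_nsq = hi // n2 - (lo - 1) // n2
--         atoms.append(c_n - c_nsq)
--     return atoms
-- ===== SOURCE B (Python) =====
-- def per_strip_atoms(b, n, d):
--     if b < 2:
--         return []
--     W = b ** (d - 1)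
--     n2 = n * n
--     # One big divmod per modulus at the first boundary; after that each new
--     # boundary quotient is produced by remainder propagation: boundaries step
--     # by W, so the next quotient is q + W//n plus a small-divmod carry.
--     qW, rW = divmod(W, n)
--     qW2, rW2 = divmod(W, n2)
--     q, r = divmod(W - 1, n)
--     q2, r2 = divmod(W - 1, n2)
--     atoms = []
--     for _ in range(1, b):
--         c, r = divmod(r + rW, n)
--         c2, r2 = divmod(r2 + rW2, n2)
--         nq = q + qW + c
--         nq2 = q2 + qW2 + c2
--         atoms.append((nq - q) - (nq2 - q2))
--         q, q2 = nq, nq2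
--     return atoms
-- ===== Notes on version B (the rewrite author's own statement) =====
-- stated objective: alternative
-- what changed: B replaces A's four big floor-divisions per strip by remainder propagation: one divmod per modulus at the first boundary, then each boundary quotient is updated incrementally with a small-operand divmod carry instead of re-dividing the full boundary value. Pre_ excludes inputs where A raises ZeroDivisionError (n=0 with b>=2, or b=0 with d<=0) or returns floats rather than ints (d<=0 with b>=2).
-- outside the precondition, e.g. on per_strip_atoms(10, 0, 2): A raises ZeroDivisionError, B raises ZeroDivisionError
import Mathlib
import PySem

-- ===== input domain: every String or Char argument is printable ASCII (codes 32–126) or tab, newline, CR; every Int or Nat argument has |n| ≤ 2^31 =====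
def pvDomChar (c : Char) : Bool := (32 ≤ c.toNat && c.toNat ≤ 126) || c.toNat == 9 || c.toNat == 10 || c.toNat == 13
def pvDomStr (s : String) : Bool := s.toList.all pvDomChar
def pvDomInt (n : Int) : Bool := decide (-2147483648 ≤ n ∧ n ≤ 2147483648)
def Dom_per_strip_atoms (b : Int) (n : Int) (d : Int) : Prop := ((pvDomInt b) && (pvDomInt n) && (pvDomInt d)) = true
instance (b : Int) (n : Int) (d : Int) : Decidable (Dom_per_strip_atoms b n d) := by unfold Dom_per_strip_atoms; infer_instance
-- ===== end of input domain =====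

-- B replaces A's four big floor-divisions per strip by remainder propagation: one divmod
-- per modulus at the first boundary, then each boundary quotient is updated with a
-- small-operand divmod carry (objective: alternative).

-- ===== PORT A =====
def per_strip_atoms (b : Int) (n : Int) (d : Int) : List Int :=
  let W := b ^ (d - 1).toNat
  let n2 := n * n
  (PySem.List.pyRange 1 b 1).foldl (fun atoms k =>
    let lo := k * W
    let hi := (k + 1) * W - 1
    let c_n := PySem.Int.floordiv hi n - PySem.Int.floordiv (lo - 1) n
    let c_nsq := PySem.Int.floordiv hi n2 - PySem.Int.floordiv (lo - 1) n2
    atoms ++ [c_n - c_nsq]) []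

-- ===== PORT B =====
-- state of the loop: (atoms, q, r, q2, r2) with (q, r) = divmod(boundary, n),
-- (q2, r2) = divmod(boundary, n*n); divmod(a, m) is ported as (floordiv a m, mod a m)
def per_strip_atoms_alt (b : Int) (n : Int) (d : Int) : List Int :=
  if b < 2 then []
  else
    let W := b ^ (d - 1).toNat
    let st := (PySem.List.pyRange 1 b 1).foldl (fun st (_ : Int) =>
      let c := PySem.Int.floordiv (st.2.2.1 + PySem.Int.mod W n) n
      let r' := PySem.Int.mod (st.2.2.1 + PySem.Int.mod W n) n
      let c2 := PySem.Int.floordiv (st.2.2.2.2 + PySem.Int.mod W (n * n)) (n * n)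
      let r2' := PySem.Int.mod (st.2.2.2.2 + PySem.Int.mod W (n * n)) (n * n)
      let nq := st.2.1 + PySem.Int.floordiv W n + c
      let nq2 := st.2.2.2.1 + PySem.Int.floordiv W (n * n) + c2
      (st.1 ++ [(nq - st.2.1) - (nq2 - st.2.2.2.1)], nq, r', nq2, r2'))
      (([] : List Int), PySem.Int.floordiv (W - 1) n, PySem.Int.mod (W - 1) n,
       PySem.Int.floordiv (W - 1) (n * n), PySem.Int.mod (W - 1) (n * n))
    st.1

-- ===== PRECONDITION & SPEC =====
-- Pre_ excludes exactly the inputs on which the Python A does not return a list of ints: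
-- for b ≥ 2 it needs n ≠ 0 (ZeroDivisionError) and d ≥ 1 (b**(d-1) is a float otherwise,
-- so the list elements are floats); for b = 0, d ≤ 0 the expression 0**(d-1) raises.
def Pre_per_strip_atoms (b : Int) (n : Int) (d : Int) : Prop :=
  (b ≤ 1 ∨ (1 ≤ d ∧ n ≠ 0)) ∧ ¬(b = 0 ∧ d ≤ 0)
instance (b : Int) (n : Int) (d : Int) : Decidable (Pre_per_strip_atoms b n d) := by
  unfold Pre_per_strip_atoms; infer_instance
def pvWitness_per_strip_atoms : Int × Int × Int := (10, 3, 2)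

def Spec_per_strip_atoms (b : Int) (n : Int) (d : Int) (out : List Int) : Prop := out = per_strip_atoms_alt b n d
instance (b : Int) (n : Int) (d : Int) (out : List Int) : Decidable (Spec_per_strip_atoms b n d out) := by unfold Spec_per_strip_atoms; infer_instance

-- ===== CLAIM (what is proved, stated in full; the proofs are below) =====
def Claim_equal_per_strip_atoms : Prop := ∀ (b : Int) (n : Int) (d : Int), Dom_per_strip_atoms b n d → Pre_per_strip_atoms b n d → Spec_per_strip_atoms b n d (per_strip_atoms b n d)

-- ===== LEMMAS AND PROOFS =====

-- the count of multiples of n but not n² in strip k, as A computes it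
def pvAtom (W n : Int) (k : Int) : Int :=
  (PySem.Int.floordiv ((k + 1) * W - 1) n - PySem.Int.floordiv (k * W - 1) n)
  - (PySem.Int.floordiv ((k + 1) * W - 1) (n * n) - PySem.Int.floordiv (k * W - 1) (n * n))

theorem per_strip_atoms_eq_map (b n d : Int) :
    per_strip_atoms b n d
      = (PySem.List.pyRange 1 b 1).map (pvAtom (b ^ (d - 1).toNat) n) := by
  unfold per_strip_atoms
  rw [PySem.List.foldl_append_singleton_eq_map]
  simp [pvAtom]

-- remainder propagation: floordiv/mod of a sum from the parts' floordivs/mods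
theorem pv_split_fdiv (n x y : Int) (hn : n ≠ 0) :
    PySem.Int.floordiv (x + y) n
      = PySem.Int.floordiv x n + PySem.Int.floordiv y n
        + PySem.Int.floordiv (PySem.Int.mod x n + PySem.Int.mod y n) n := by
  have cdiv : ∀ a b : Int, PySem.Int.floordiv a b = Int.fdiv a b := fun _ _ => rfl
  have cmod : ∀ a b : Int, PySem.Int.mod a b = Int.fmod a b := fun _ _ => rfl
  have hx := PySem.Int.floordiv_mul_add_mod x n
  have hy := PySem.Int.floordiv_mul_add_mod y n
  simp only [cdiv, cmod] at hx hy ⊢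
  have hxy : x + y = (x.fmod n + y.fmod n) + n * (x.fdiv n + y.fdiv n) := by
    linear_combination -hx - hy
  rw [hxy, Int.add_mul_fdiv_left _ _ hn]
  ring

theorem pv_split_fmod (n x y : Int) :
    PySem.Int.mod (x + y) n
      = PySem.Int.mod (PySem.Int.mod x n + PySem.Int.mod y n) n := by
  have cdiv : ∀ a b : Int, PySem.Int.floordiv a b = Int.fdiv a b := fun _ _ => rfl
  have cmod : ∀ a b : Int, PySem.Int.mod a b = Int.fmod a b := fun _ _ => rfl
  have hx := PySem.Int.floordiv_mul_add_mod x n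
  have hy := PySem.Int.floordiv_mul_add_mod y n
  simp only [cdiv, cmod] at hx hy ⊢
  have hxy : x + y = (x.fmod n + y.fmod n) + n * (x.fdiv n + y.fdiv n) := by
    linear_combination -hx - hy
  rw [hxy, Int.add_mul_fmod_self_left]

-- loop invariant for B's fold: the state carries divmod of the current boundary j*W-1,
-- and each step appends exactly A's strip count pvAtom W n j
theorem pv_fold_invariant (W n : Int) (hn : n ≠ 0) :
    ∀ (L : List Int) (acc : List Int) (j : Int),
    (L.foldl (fun st (_ : Int) =>
      let c := PySem.Int.floordiv (st.2.2.1 + PySem.Int.mod W n) n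
      let r' := PySem.Int.mod (st.2.2.1 + PySem.Int.mod W n) n
      let c2 := PySem.Int.floordiv (st.2.2.2.2 + PySem.Int.mod W (n * n)) (n * n)
      let r2' := PySem.Int.mod (st.2.2.2.2 + PySem.Int.mod W (n * n)) (n * n)
      let nq := st.2.1 + PySem.Int.floordiv W n + c
      let nq2 := st.2.2.2.1 + PySem.Int.floordiv W (n * n) + c2
      (st.1 ++ [(nq - st.2.1) - (nq2 - st.2.2.2.1)], nq, r', nq2, r2'))
      (acc, PySem.Int.floordiv (j * W - 1) n, PySem.Int.mod (j * W - 1) n,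
       PySem.Int.floordiv (j * W - 1) (n * n), PySem.Int.mod (j * W - 1) (n * n))).1
    = acc ++ (PySem.List.pyRange j (j + L.length) 1).map (pvAtom W n) := by
  intro L
  induction L with
  | nil =>
    intro acc j
    simp only [List.foldl_nil, List.length_nil, Nat.cast_zero, add_zero,
      PySem.List.pyRange_one_eq_nil (le_refl j), List.map_nil, List.append_nil]
  | cons x L ih =>
    intro acc j
    have hn2 : n * n ≠ 0 := mul_ne_zero hn hn
    have hq : PySem.Int.floordiv (j * W - 1) n + PySem.Int.floordiv W n
        + PySem.Int.floordiv (PySem.Int.mod (j * W - 1) n + PySem.Int.mod W n) n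
        = PySem.Int.floordiv ((j + 1) * W - 1) n := by
      rw [← pv_split_fdiv n (j * W - 1) W hn] ; ring_nf
    have hr : PySem.Int.mod (PySem.Int.mod (j * W - 1) n + PySem.Int.mod W n) n
        = PySem.Int.mod ((j + 1) * W - 1) n := by
      rw [← pv_split_fmod n (j * W - 1) W] ; ring_nf
    have hq2 : PySem.Int.floordiv (j * W - 1) (n * n) + PySem.Int.floordiv W (n * n)
        + PySem.Int.floordiv (PySem.Int.mod (j * W - 1) (n * n) + PySem.Int.mod W (n * n)) (n * n)
        = PySem.Int.floordiv ((j + 1) * W - 1) (n * n) := by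
      rw [← pv_split_fdiv (n * n) (j * W - 1) W hn2] ; ring_nf
    have hr2 : PySem.Int.mod (PySem.Int.mod (j * W - 1) (n * n) + PySem.Int.mod W (n * n)) (n * n)
        = PySem.Int.mod ((j + 1) * W - 1) (n * n) := by
      rw [← pv_split_fmod (n * n) (j * W - 1) W] ; ring_nf
    have hrange : PySem.List.pyRange j (j + ((x :: L).length : Nat)) 1
        = j :: PySem.List.pyRange (j + 1) (j + 1 + (L.length : Nat)) 1 := by
      rw [show j + (((x :: L).length : Nat) : Int) = j + 1 + ((L.length : Nat) : Int) from by
        push_cast [List.length_cons] ; ring]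
      rw [PySem.List.pyRange_one_cons (by omega)]
    rw [List.foldl_cons]
    dsimp only
    rw [hq, hr, hq2, hr2, hrange, List.map_cons]
    rw [show PySem.Int.floordiv ((j + 1) * W - 1) n - PySem.Int.floordiv (j * W - 1) n
        - (PySem.Int.floordiv ((j + 1) * W - 1) (n * n) - PySem.Int.floordiv (j * W - 1) (n * n))
        = pvAtom W n j from rfl]
    rw [ih (acc ++ [pvAtom W n j]) (j + 1), List.append_assoc]
    rfl

-- ===== VERDICT (by name: the statement is the Claim_ definition above) =====
theorem per_strip_atoms_spec : Claim_equal_per_strip_atoms := by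
  intro b n d _ hpre
  unfold Spec_per_strip_atoms
  rw [per_strip_atoms_eq_map]
  unfold per_strip_atoms_alt
  by_cases hb : b < 2
  · rw [if_pos hb, PySem.List.pyRange_one_eq_nil (by omega)]
    simp
  · rw [if_neg hb]
    obtain ⟨h1, _⟩ := hpre
    have hn : n ≠ 0 := by
      rcases h1 with h | h
      · omega
      · exact h.2
    have hinv := pv_fold_invariant (b ^ (d - 1).toNat) n hn (PySem.List.pyRange 1 b 1) [] 1
    simp only [one_mul] at hinv
    have hlen : (1 : Int) + ((PySem.List.pyRange 1 b 1).length : Int) = b := by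
      rw [PySem.List.length_pyRange_one] ; omega
    rw [hlen] at hinv
    simp only [hinv, List.nil_append]
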